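-- pv_equiv track=rewrite | github.com/phonopy/phelel | src/phelel/velph/utils/vasp.py | _is_factorized_by_2357
-- ===== SOURCE A (Python) =====
-- def _is_factorized_by_2357(n: int) -> bool:
--     """Check if n can be dividable by 2 and be factorized only by 2, 3, 5, and 7."""
--     if (n // 2) * 2 != n:
--         return False
--
--     _n = n
--     for div in (2, 3, 5, 7):
--         while (_n // div) * div == _n:
--             _n = _n // div
--
--     if _n == 1:
--         return True
--     else:
--         return False
-- ===== SOURCE B (Python) =====
-- def _gcd(a: int, b: int) -> int:
--     a = abs(a)
--     while b != 0:
--         a, b = b, a % b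
--     return a
--
--
-- def _is_factorized_by_2357(n: int) -> bool:
--     """Check if n can be dividable by 2 and be factorized only by 2, 3, 5, and 7."""
--     if n % 2 != 0:
--         return False
--     _n = n
--     g = _gcd(_n, 210)
--     while g != 1:
--         _n //= g
--         g = _gcd(_n, 210)
--     return _n == 1
-- ===== Notes on version B (the rewrite author's own statement) =====
-- stated objective: alternative
-- what changed: Replaces the nested per-prime trial-division loops over (2,3,5,7) by a single loop that repeatedly divides n by gcd(n, 210) (Euclid's algorithm, hand-written) until the gcd is 1, checking the even guard with n % 2.
import Mathlib
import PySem

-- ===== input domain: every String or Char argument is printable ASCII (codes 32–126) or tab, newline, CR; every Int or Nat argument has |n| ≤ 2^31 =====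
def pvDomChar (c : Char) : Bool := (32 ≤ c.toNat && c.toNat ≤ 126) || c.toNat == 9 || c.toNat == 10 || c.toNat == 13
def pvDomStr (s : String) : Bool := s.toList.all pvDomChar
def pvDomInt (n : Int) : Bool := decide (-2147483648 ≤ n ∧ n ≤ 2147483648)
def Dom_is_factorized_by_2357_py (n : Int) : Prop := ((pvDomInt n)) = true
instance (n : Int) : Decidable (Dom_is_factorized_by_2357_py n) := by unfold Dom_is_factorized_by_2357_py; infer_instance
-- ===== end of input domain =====

-- B replaces the per-prime nested trial-division loops by one gcd-with-210 stripping loop (hand-written Euclid); objective: idiomatic/alternative, same behaviour on all n ≠ 0 (both programs diverge at n = 0, excluded by Pre_).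


-- ===== PORT A =====
-- inner `while (_n // div) * div == _n: _n = _n // div` loop; fuel = |initial _n| is enough
-- for every n ≠ 0 (each pass divides |_n| by div ≥ 2); at n = 0 Python diverges (outside Pre_).
def stripA (p : Int) : Nat → Int → Int
  | 0, m => m
  | f+1, m =>
      if PySem.Int.floordiv m p * p = m then stripA p f (PySem.Int.floordiv m p) else m

def is_factorized_by_2357_py (n : Int) : Bool :=
  if PySem.Int.floordiv n 2 * 2 ≠ n then false
  else
    let n1 := stripA 2 n.natAbs n
    let n2 := stripA 3 n1.natAbs n1
    let n3 := stripA 5 n2.natAbs n2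
    let n4 := stripA 7 n3.natAbs n3
    decide (n4 = 1)

-- ===== PORT B =====
-- hand-written Euclid from Source B: a = abs(a); while b != 0: a, b = b, a % b  (all values stay in Nat)
def euclid (a b : Nat) : Nat :=
  if h : b = 0 then a else euclid b (a % b)
decreasing_by exact Nat.mod_lt _ (Nat.pos_of_ne_zero h)

-- `while g != 1: _n //= g; g = _gcd(_n, 210)` loop; fuel = |initial _n| suffices (g ≥ 2 each pass).
def stripB : Nat → Int → Int
  | 0, m => m
  | f+1, m =>
      if euclid m.natAbs 210 ≠ 1 then
        stripB f (PySem.Int.floordiv m ((euclid m.natAbs 210 : Nat) : Int))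
      else m

def is_factorized_by_2357_py_alt (n : Int) : Bool :=
  if PySem.Int.mod n 2 ≠ 0 then false
  else decide (stripB n.natAbs n = 1)

-- ===== PRECONDITION & SPEC =====
-- Pre_ excludes only n = 0, on which BOTH Python programs loop forever (A returns on every other int).
def Pre_is_factorized_by_2357_py (n : Int) : Prop := n ≠ 0
instance (n : Int) : Decidable (Pre_is_factorized_by_2357_py n) := by unfold Pre_is_factorized_by_2357_py; infer_instance
def pvWitness_is_factorized_by_2357_py : Int := 420

def Spec_is_factorized_by_2357_py (n : Int) (out : Bool) : Prop := out = is_factorized_by_2357_py_alt n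
instance (n : Int) (out : Bool) : Decidable (Spec_is_factorized_by_2357_py n out) := by unfold Spec_is_factorized_by_2357_py; infer_instance

-- ===== CLAIM (what is proved, stated in full; the proofs are below) =====
def Claim_equal_is_factorized_by_2357_py : Prop := ∀ (n : Int), Dom_is_factorized_by_2357_py n → Pre_is_factorized_by_2357_py n → Spec_is_factorized_by_2357_py n (is_factorized_by_2357_py n)

-- ===== LEMMAS AND PROOFS =====

-- s is a (positive) product of primes from {2,3,5,7}
def Smooth (s : Nat) : Prop := 0 < s ∧ ∀ p, Nat.Prime p → p ∣ s → p = 2 ∨ p = 3 ∨ p = 5 ∨ p = 7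

set_option maxRecDepth 100000 in
lemma prime_dvd_210 : ∀ p, Nat.Prime p → p ∣ 210 → p = 2 ∨ p = 3 ∨ p = 5 ∨ p = 7 := by
  have h : ∀ p : Nat, p < 211 → Nat.Prime p → p ∣ 210 → p = 2 ∨ p = 3 ∨ p = 5 ∨ p = 7 := by decide
  intro p hp hd
  exact h p (Nat.lt_succ_of_le (Nat.le_of_dvd (by norm_num) hd)) hp hd

lemma smooth_of_dvd_210 {g : Nat} (hg : g ∣ 210) (h0 : 0 < g) : Smooth g :=
  ⟨h0, fun p hp hd => prime_dvd_210 p hp (hd.trans hg)⟩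

lemma smooth_mul {s t : Nat} (hs : Smooth s) (ht : Smooth t) : Smooth (s * t) :=
  ⟨Nat.mul_pos hs.1 ht.1, fun p hp hd => by
    rcases (Nat.Prime.dvd_mul hp).mp hd with h | h
    · exact hs.2 p hp h
    · exact ht.2 p hp h⟩

lemma smooth_pow {q : Nat} (hq : Nat.Prime q) (hmem : q = 2 ∨ q = 3 ∨ q = 5 ∨ q = 7) (k : Nat) : Smooth (q ^ k) :=
  ⟨pow_pos hq.pos k, fun p hp hd => by
    have := (Nat.Prime.dvd_of_dvd_pow hp hd)
    have : p = q := (Nat.prime_dvd_prime_iff_eq hp hq).mp this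
    exact this ▸ hmem⟩

lemma coprime_of_smooth {r s : Nat} (hr : Nat.Coprime r 210) (hs : Smooth s) : Nat.Coprime r s := by
  by_contra h
  obtain ⟨q, hq, hqd⟩ := Nat.exists_prime_and_dvd h
  have hq1 : q ∣ r := hqd.trans (Nat.gcd_dvd_left _ _)
  have hq2 : q ∣ s := hqd.trans (Nat.gcd_dvd_right _ _)
  have h210 : q ∣ 210 := by
    rcases hs.2 q hq hq2 with h | h | h | h <;> subst h <;> decide
  have : q ∣ 1 := hr ▸ Nat.dvd_gcd hq1 h210
  exact hq.ne_one (Nat.eq_one_of_dvd_one this)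

lemma euclid_eq_gcd : ∀ a b : Nat, euclid a b = Nat.gcd a b := by
  intro a b
  induction b using Nat.strong_induction_on generalizing a with
  | _ b ih =>
    rw [euclid]
    split
    · rename_i h; subst h; simp
    · rename_i h
      rw [ih (a % b) (Nat.mod_lt _ (Nat.pos_of_ne_zero h)) b, Nat.gcd_comm b (a % b),
        ← Nat.gcd_rec, Nat.gcd_comm]

lemma smooth_one : Smooth 1 :=
  ⟨one_pos, fun _ hp hd => absurd (Nat.eq_one_of_dvd_one hd) hp.ne_one⟩

lemma stripA_spec (p : Int) (hp : 2 ≤ p) :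
    ∀ (f : Nat) (m : Int), m ≠ 0 → m.natAbs ≤ f →
      ∃ k : Nat, m = stripA p f m * p ^ k ∧ ¬ p ∣ stripA p f m := by
  intro f
  induction f with
  | zero => intro m hm hf; exact absurd (Int.natAbs_eq_zero.mp (Nat.le_zero.mp hf)) hm
  | succ f ih =>
    intro m hm hf
    by_cases hc : PySem.Int.floordiv m p * p = m
    · have hm' : PySem.Int.floordiv m p ≠ 0 := by
        intro h0; rw [h0, zero_mul] at hc; exact hm hc.symm
      have hlt : (PySem.Int.floordiv m p).natAbs < m.natAbs := by
        have h2 : 2 ≤ p.natAbs := by omega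
        have h1 : 0 < (PySem.Int.floordiv m p).natAbs := by omega
        calc (PySem.Int.floordiv m p).natAbs
            < (PySem.Int.floordiv m p).natAbs * p.natAbs := by nlinarith
          _ = m.natAbs := by rw [← Int.natAbs_mul, hc]
      obtain ⟨k, hk, hnd⟩ := ih (PySem.Int.floordiv m p) hm' (by omega)
      refine ⟨k + 1, ?_, ?_⟩
      · simp only [stripA, if_pos hc]
        rw [pow_succ, ← mul_assoc, ← hk, hc]
      · simpa only [stripA, if_pos hc] using hnd
    · refine ⟨0, by simp [stripA, if_neg hc], ?_⟩
      simp only [stripA, if_neg hc]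
      intro hd
      have h0 : PySem.Int.mod m p = 0 := (PySem.Int.mod_eq_zero_iff_dvd m p).mpr hd
      have := PySem.Int.floordiv_mul_add_mod m p
      rw [h0, add_zero] at this
      exact hc this


lemma stripB_spec :
    ∀ (f : Nat) (m : Int), m ≠ 0 → m.natAbs ≤ f →
      ∃ s : Nat, Smooth s ∧ m = stripB f m * (s : Int) ∧ Nat.Coprime (stripB f m).natAbs 210 := by
  intro f
  induction f with
  | zero => intro m hm hf; exact absurd (Int.natAbs_eq_zero.mp (Nat.le_zero.mp hf)) hm
  | succ f ih =>
    intro m hm hf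
    by_cases hg : euclid m.natAbs 210 ≠ 1
    · have heq : euclid m.natAbs 210 = Nat.gcd m.natAbs 210 := euclid_eq_gcd _ _
      have hgpos : 0 < euclid m.natAbs 210 := by
        rw [heq]; exact Nat.gcd_pos_of_pos_right _ (by norm_num)
      have hgdvd : ((euclid m.natAbs 210 : Nat) : Int) ∣ m :=
        Int.dvd_natAbs.mp (Int.natCast_dvd_natCast.mpr (heq ▸ Nat.gcd_dvd_left _ _))
      have hg210 : euclid m.natAbs 210 ∣ 210 := heq ▸ Nat.gcd_dvd_right _ _
      have hexact : PySem.Int.floordiv m (euclid m.natAbs 210) * (euclid m.natAbs 210) = m := by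
        have h0 : PySem.Int.mod m (euclid m.natAbs 210) = 0 :=
          (PySem.Int.mod_eq_zero_iff_dvd _ _).mpr hgdvd
        have := PySem.Int.floordiv_mul_add_mod m (euclid m.natAbs 210)
        rw [h0, add_zero] at this; exact this
      set m' := PySem.Int.floordiv m ((euclid m.natAbs 210 : Nat) : Int) with hm'def
      have hm' : m' ≠ 0 := by intro h0; rw [h0, zero_mul] at hexact; exact hm hexact.symm
      have hlt : m'.natAbs < m.natAbs := by
        have h2 : 2 ≤ euclid m.natAbs 210 := by omega
        have h1 : 0 < m'.natAbs := by omega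
        calc m'.natAbs < m'.natAbs * (((euclid m.natAbs 210 : Nat) : Int)).natAbs := by
              simp only [Int.natAbs_natCast]; nlinarith
          _ = m.natAbs := by rw [← Int.natAbs_mul, hexact]
      obtain ⟨s', hs', hkey, hcop⟩ := ih m' hm' (by omega)
      refine ⟨s' * euclid m.natAbs 210, smooth_mul hs' (smooth_of_dvd_210 hg210 hgpos), ?_, ?_⟩
      · simp only [stripB, if_pos hg]
        push_cast
        rw [← mul_assoc, ← hkey, hexact]
      · simpa only [stripB, if_pos hg] using hcop
    · rw [not_not] at hg
      refine ⟨1, smooth_one, by simp [stripB, hg], ?_⟩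
      have hstep : stripB (f+1) m = m := by simp [stripB, hg]
      rw [hstep]
      show Nat.gcd m.natAbs 210 = 1
      rw [← euclid_eq_gcd]; exact hg


-- uniqueness of the 210-rough part (up to the shared sign of n)
lemma rough_unique {n r1 r2 : Int} {s1 s2 : Nat} (hn : n ≠ 0)
    (h1 : n = r1 * s1) (h2 : n = r2 * s2) (hs1 : Smooth s1) (hs2 : Smooth s2)
    (c1 : Nat.Coprime r1.natAbs 210) (c2 : Nat.Coprime r2.natAbs 210) : r1 = r2 := by
  have e : r1 * (s1 : Int) = r2 * (s2 : Int) := h1 ▸ h2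
  have ea : r1.natAbs * s1 = r2.natAbs * s2 := by
    have := congrArg Int.natAbs e
    simpa [Int.natAbs_mul] using this
  have cop12 : Nat.Coprime r1.natAbs s2 := coprime_of_smooth c1 hs2
  have cop21 : Nat.Coprime r2.natAbs s1 := coprime_of_smooth c2 hs1
  have d1 : r1.natAbs ∣ r2.natAbs := by
    refine cop12.dvd_of_dvd_mul_right ?_
    exact ea ▸ Dvd.intro s1 rfl
  have d2 : r2.natAbs ∣ r1.natAbs := by
    refine cop21.dvd_of_dvd_mul_right ?_
    exact ea.symm ▸ Dvd.intro s2 rfl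
  have habs : r1.natAbs = r2.natAbs := Nat.dvd_antisymm d1 d2
  rcases Int.natAbs_eq_natAbs_iff.mp habs with h | h
  · exact h
  · have h0 : r2 * ((s1 : Int) + (s2 : Int)) = 0 := by
      rw [h] at e; linear_combination -e
    have hs1p : (0 : Int) < s1 := by exact_mod_cast hs1.1
    have hs2p : (0 : Int) < s2 := by exact_mod_cast hs2.1
    rcases mul_eq_zero.mp h0 with h0 | h0
    · exact absurd (by rw [h2, h0, zero_mul]) hn
    · omega

lemma coprime_210_of_not_dvd {r : Int} (h2 : ¬(2:Int) ∣ r) (h3 : ¬(3:Int) ∣ r)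
    (h5 : ¬(5:Int) ∣ r) (h7 : ¬(7:Int) ∣ r) : Nat.Coprime r.natAbs 210 := by
  by_contra h
  obtain ⟨q, hq, hqd⟩ := Nat.exists_prime_and_dvd h
  have hqr : (q : Int) ∣ r :=
    Int.dvd_natAbs.mp (Int.natCast_dvd_natCast.mpr (hqd.trans (Nat.gcd_dvd_left _ _)))
  have h210 : q ∣ 210 := hqd.trans (Nat.gcd_dvd_right _ _)
  rcases prime_dvd_210 q hq h210 with h | h | h | h <;> subst h
  · exact h2 (by exact_mod_cast hqr)
  · exact h3 (by exact_mod_cast hqr)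
  · exact h5 (by exact_mod_cast hqr)
  · exact h7 (by exact_mod_cast hqr)

-- ===== VERDICT (by name: the statement is the Claim_ definition above) =====
theorem is_factorized_by_2357_py_spec : Claim_equal_is_factorized_by_2357_py := by
  intro n _ hn
  unfold Spec_is_factorized_by_2357_py is_factorized_by_2357_py is_factorized_by_2357_py_alt
  have hid := PySem.Int.floordiv_mul_add_mod n 2
  by_cases he : PySem.Int.mod n 2 = 0
  · have hA : PySem.Int.floordiv n 2 * 2 = n := by omega
    rw [if_neg (not_not_intro hA), if_neg (not_not_intro he)]
    show decide
        (stripA 7 (stripA 5 (stripA 3 (stripA 2 n.natAbs n).natAbs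
            (stripA 2 n.natAbs n)).natAbs (stripA 3 (stripA 2 n.natAbs n).natAbs
            (stripA 2 n.natAbs n))).natAbs
          (stripA 5 (stripA 3 (stripA 2 n.natAbs n).natAbs
            (stripA 2 n.natAbs n)).natAbs (stripA 3 (stripA 2 n.natAbs n).natAbs
            (stripA 2 n.natAbs n))) = 1) =
      decide (stripB n.natAbs n = 1)
    set m1 := stripA 2 n.natAbs n with hm1
    set m2 := stripA 3 m1.natAbs m1 with hm2
    set m3 := stripA 5 m2.natAbs m2 with hm3
    set m4 := stripA 7 m3.natAbs m3 with hm4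
    obtain ⟨a, ha, h2d⟩ := stripA_spec 2 (by norm_num) n.natAbs n hn le_rfl
    have hn1 : m1 ≠ 0 := by intro h; rw [← hm1, h, zero_mul] at ha; exact hn ha
    obtain ⟨b, hb, h3d⟩ := stripA_spec 3 (by norm_num) m1.natAbs m1 hn1 le_rfl
    have hn2 : m2 ≠ 0 := by intro h; rw [← hm2, h, zero_mul] at hb; exact hn1 hb
    obtain ⟨c, hc, h5d⟩ := stripA_spec 5 (by norm_num) m2.natAbs m2 hn2 le_rfl
    have hn3 : m3 ≠ 0 := by intro h; rw [← hm3, h, zero_mul] at hc; exact hn2 hc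
    obtain ⟨d, hd, h7d⟩ := stripA_spec 7 (by norm_num) m3.natAbs m3 hn3 le_rfl
    rw [← hm1] at ha h2d
    rw [← hm2] at hb h3d
    rw [← hm3] at hc h5d
    rw [← hm4] at hd h7d
    -- m4 divides every earlier value of the loop variable
    have hd41 : m4 ∣ m1 :=
      (Dvd.intro _ hd.symm).trans ((Dvd.intro _ hc.symm).trans (Dvd.intro _ hb.symm))
    have hd42 : m4 ∣ m2 := (Dvd.intro _ hd.symm).trans (Dvd.intro _ hc.symm)
    have hd43 : m4 ∣ m3 := Dvd.intro _ hd.symm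
    have cA : Nat.Coprime m4.natAbs 210 :=
      coprime_210_of_not_dvd (fun h => h2d (h.trans hd41)) (fun h => h3d (h.trans hd42))
        (fun h => h5d (h.trans hd43)) h7d
    have hsA : Smooth (2 ^ a * 3 ^ b * 5 ^ c * 7 ^ d) :=
      smooth_mul (smooth_mul (smooth_mul
        (smooth_pow Nat.prime_two (by tauto) a)
        (smooth_pow Nat.prime_three (by tauto) b))
        (smooth_pow (by norm_num) (by tauto) c))
        (smooth_pow (by norm_num) (by tauto) d)
    have hnA : n = m4 * ((2 ^ a * 3 ^ b * 5 ^ c * 7 ^ d : Nat) : Int) := by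
      rw [ha, hb, hc, hd]; push_cast; ring
    obtain ⟨sB, hsB, hnB, cB⟩ := stripB_spec n.natAbs n hn le_rfl
    have key : m4 = stripB n.natAbs n := rough_unique hn hnA hnB hsA hsB cA cB
    rw [key]
  · have hA : PySem.Int.floordiv n 2 * 2 ≠ n := by omega
    rw [if_pos hA, if_pos he]
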